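-- pv_equiv track=rewrite | github.com/Tyler-Wahlman/cs325-p2 | app/rag_pipeline.py | format_citations
-- ===== SOURCE A (Python) =====
-- from typing import List, Dict
--
-- def format_citations(metadatas: List[Dict]) -> str:
--     """Format retrieved metadata into deduplicated source citations."""
--     seen = set()
--     citations = []
--
--     for meta in metadatas:
--         citation = f"{meta.get('source')} (page {meta.get('page')})"
--         if citation not in seen:
--             citations.append(citation)
--             seen.add(citation)
--
--     return "\n".join(citations)
-- ===== SOURCE B (Python) =====
-- from typing import List, Dict
--
-- def format_citations(metadatas: List[Dict]) -> str:
--     """Format retrieved metadata into deduplicated source citations."""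
--     citations = [f"{m.get('source')} (page {m.get('page')})" for m in metadatas]
--
--     def dedup(xs):
--         # keep the head, recursively dedup the tail with all copies of the head removed
--         if not xs:
--             return []
--         head = xs[0]
--         return [head] + dedup([x for x in xs[1:] if x != head])
--
--     return "\n".join(dedup(citations))
-- ===== Notes on version B (the rewrite author's own statement) =====
-- stated objective: alternative
-- what changed: Replaces the interleaved seen-set loop by a materialize-then-dedup pipeline whose dedup is a recursive divide step: keep the head and recursively dedup the tail with every copy of the head filtered out, so no seen-container is maintained at all.
import Mathlib
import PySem

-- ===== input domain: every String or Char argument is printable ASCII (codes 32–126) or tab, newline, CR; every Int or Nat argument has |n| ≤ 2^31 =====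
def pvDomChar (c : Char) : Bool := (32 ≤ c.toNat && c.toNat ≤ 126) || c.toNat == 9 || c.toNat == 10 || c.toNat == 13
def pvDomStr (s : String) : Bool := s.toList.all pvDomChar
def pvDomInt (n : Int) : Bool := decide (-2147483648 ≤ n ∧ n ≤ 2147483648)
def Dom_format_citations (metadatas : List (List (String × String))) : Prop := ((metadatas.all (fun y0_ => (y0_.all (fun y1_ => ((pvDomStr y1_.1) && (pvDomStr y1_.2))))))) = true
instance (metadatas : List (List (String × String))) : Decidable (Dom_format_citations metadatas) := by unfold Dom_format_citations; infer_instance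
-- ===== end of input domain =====

-- B builds all citation strings first and deduplicates them with a recursive head-keep/filter-tail step (no seen-container); same return value, no speed claim.

-- ===== PORT A =====
-- str(md.get('source')) / str(md.get('page')) : a missing key prints as "None"
def pvFmtA (md : List (String × String)) : String :=
  (match (PySem.Dict.mk md).get? "source" with
   | some s => s
   | none => "None") ++ " (page " ++
  (match (PySem.Dict.mk md).get? "page" with
   | some s => s
   | none => "None") ++ ")"

def format_citations (metadatas : List (List (String × String))) : String :=
  -- seen = set(); citations = []; for md in metadatas: …; return "\n".join(citations)
  let st := metadatas.foldl
    (fun (st : PySem.Set String × List String) md =>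
      let citation := pvFmtA md
      if PySem.Set.contains st.1 citation then st
      else (PySem.Set.add st.1 citation, st.2 ++ [citation]))
    (PySem.Set.empty, [])
  PySem.Str.join "\n" st.2

-- ===== PORT B =====
def pvFmtB (m : List (String × String)) : String :=
  (match (PySem.Dict.mk m).get? "source" with
   | some s => s
   | none => "None") ++ " (page " ++
  (match (PySem.Dict.mk m).get? "page" with
   | some s => s
   | none => "None") ++ ")"

-- def dedup(xs): if not xs: return []; head = xs[0]; return [head] + dedup([x for x in xs[1:] if x != head])
def pvDedupRec : List String → List String
  | [] => []
  | head :: xs => head :: pvDedupRec (xs.filter (fun x => x != head))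
termination_by l => l.length
decreasing_by simpa using Nat.lt_succ_of_le (List.length_filter_le _ _)

def format_citations_alt (metadatas : List (List (String × String))) : String :=
  -- citations = [… for m in metadatas]; "\n".join(dedup(citations))
  let citations := metadatas.map pvFmtB
  PySem.Str.join "\n" (pvDedupRec citations)

-- ===== PRECONDITION & SPEC =====
def Spec_format_citations (metadatas : List (List (String × String))) (out : String) : Prop := out = format_citations_alt metadatas
instance (metadatas : List (List (String × String))) (out : String) : Decidable (Spec_format_citations metadatas out) := by unfold Spec_format_citations; infer_instance

-- ===== CLAIM (what is proved, stated in full; the proofs are below) =====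
def Claim_equal_format_citations : Prop := ∀ (metadatas : List (List (String × String))), Dom_format_citations metadatas → Spec_format_citations metadatas (format_citations metadatas)

-- ===== LEMMAS AND PROOFS =====

-- A's loop keeps seen = citations (as lists): folding from any diagonal state (s, s)
-- yields the diagonal of folding Set.add.
theorem pv_foldA_diag (l : List (List (String × String))) (s : PySem.Set String) :
    l.foldl
      (fun (st : PySem.Set String × List String) md =>
        let citation := pvFmtA md
        if PySem.Set.contains st.1 citation then st
        else (PySem.Set.add st.1 citation, st.2 ++ [citation]))
      (s, s)
    = (let u := l.foldl (fun t md => PySem.Set.add t (pvFmtA md)) s; (u, u)) := by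
  induction l generalizing s with
  | nil => rfl
  | cons m rest ih =>
    simp only [List.foldl_cons]
    by_cases h : PySem.Set.contains s (pvFmtA m) = true
    · have hadd : PySem.Set.add s (pvFmtA m) = s :=
        PySem.Set.add_of_mem (by simpa using h)
      have hm : pvFmtA m ∈ s := by simpa using h
      simpa [hm, hadd] using ih s
    · have hadd : PySem.Set.add s (pvFmtA m) = s ++ [pvFmtA m] :=
        PySem.Set.add_of_not_mem (by simpa using h)
      have hm : pvFmtA m ∉ s := by simpa using h
      simpa [hm, hadd] using ih (s ++ [pvFmtA m])

theorem pv_fold_add_map (l : List (List (String × String))) (s : PySem.Set String) :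
    l.foldl (fun t md => PySem.Set.add t (pvFmtA md)) s
      = (l.map pvFmtA).foldl PySem.Set.add s := by
  induction l generalizing s with
  | nil => rfl
  | cons m rest ih => simp [List.foldl_cons, ih]

-- The seen-set fold from state s equals s followed by the recursive dedup of the
-- elements not already in s.
theorem pv_foldl_add_eq_dedupRec (l : List String) (s : PySem.Set String) :
    l.foldl PySem.Set.add s = s ++ pvDedupRec (l.filter (fun y => !(PySem.Set.contains s y))) := by
  induction l generalizing s with
  | nil => simp [pvDedupRec]
  | cons x xs ih =>
    by_cases h : PySem.Set.contains s x = true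
    · have hadd : PySem.Set.add s x = s := PySem.Set.add_of_mem (by simpa using h)
      simp only [List.foldl_cons, List.filter_cons, h, Bool.not_true, hadd]
      simpa using ih s
    · have hadd : PySem.Set.add s x = s ++ [x] := PySem.Set.add_of_not_mem (by simpa using h)
      have hfilt : xs.filter (fun y => !(PySem.Set.contains (s ++ [x]) y))
          = (xs.filter (fun y => !(PySem.Set.contains s y))).filter (fun y => y != x) := by
        rw [List.filter_filter]
        apply List.filter_congr
        intro y _
        by_cases hy : y = x
        · simp [PySem.Set.contains, hy]
        · by_cases hm : y ∈ s <;> simp [PySem.Set.contains, hy, hm]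
      simp only [List.foldl_cons, hadd, List.filter_cons, h, Bool.not_false, if_true]
      rw [ih (s ++ [x]), hfilt]
      simp only [pvDedupRec, List.append_assoc, List.singleton_append]

-- ===== VERDICT (by name: the statement is the Claim_ definition above) =====
theorem format_citations_spec : Claim_equal_format_citations := by
  intro metadatas _
  unfold Spec_format_citations format_citations format_citations_alt
  have hfmt : pvFmtB = pvFmtA := rfl
  rw [hfmt]
  rw [show (PySem.Set.empty : PySem.Set String) = [] from rfl]
  rw [pv_foldA_diag metadatas []]
  simp only [pv_fold_add_map]
  rw [pv_foldl_add_eq_dedupRec]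
  simp [PySem.Set.contains]
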